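-- pv_equiv track=rewrite | github.com/syhunt/KanaShift | src-python/phonoshift.py | strip_checks_from_tagged
-- ===== SOURCE A (Python) =====
-- from typing import Dict, List, Optional, Tuple
--
-- def is_token_sep(ch: str) -> bool:
--     return ch in (" ", "-", "'", ".", ",", "!", "?", ":", ";", "\t", "\n", "\r")
--
-- def strip_checks_from_tagged(tagged: str, check_chars_per_token: int) -> Optional[Tuple[str, List[str]]]:
--     n = max(1, int(check_chars_per_token))
--     base = []
--     given = []
--     tok = []
--
--     def flush() -> bool:
--         if not tok:
--             return True
--         t = "".join(tok)
--         tok.clear()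
--         if len(t) <= n:
--             return False
--         chk = t[-n:]
--         base_tok = t[:-n]
--         given.append(chk)
--         base.append(base_tok)
--         return True
--
--     for c in tagged:
--         if is_token_sep(c):
--             if not flush():
--                 return None
--             base.append(c)
--         else:
--             tok.append(c)
--
--     if not flush():
--         return None
--
--     return ("".join(base), given)
-- ===== SOURCE B (Python) =====
-- from typing import Dict, List, Optional, Tuple
--
-- SEPS = " -'.,!?:;\t\n\r"
--
-- def strip_checks_from_tagged(tagged: str, check_chars_per_token: int) -> Optional[Tuple[str, List[str]]]:
--     n = max(1, int(check_chars_per_token))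
--     out = []
--     given = []
--     i = 0
--     L = len(tagged)
--     while i < L:
--         c = tagged[i]
--         if c in SEPS:
--             out.append(c)
--             i += 1
--         else:
--             j = i + 1
--             while j < L and tagged[j] not in SEPS:
--                 j += 1
--             if j - i <= n:
--                 return None
--             out.append(tagged[i:j - n])   # token minus its last n chars
--             given.append(tagged[j - n:j])  # the check suffix
--             i = j
--     return ("".join(out), given)
-- ===== Notes on version B (the rewrite author's own statement) =====
-- stated objective: faster
-- what changed: Replaced the char-by-char accumulator with a mutating flush() closure by an index-based run scanner that slices whole tokens out of the string directly and returns early on a too-short token.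
import Mathlib
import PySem

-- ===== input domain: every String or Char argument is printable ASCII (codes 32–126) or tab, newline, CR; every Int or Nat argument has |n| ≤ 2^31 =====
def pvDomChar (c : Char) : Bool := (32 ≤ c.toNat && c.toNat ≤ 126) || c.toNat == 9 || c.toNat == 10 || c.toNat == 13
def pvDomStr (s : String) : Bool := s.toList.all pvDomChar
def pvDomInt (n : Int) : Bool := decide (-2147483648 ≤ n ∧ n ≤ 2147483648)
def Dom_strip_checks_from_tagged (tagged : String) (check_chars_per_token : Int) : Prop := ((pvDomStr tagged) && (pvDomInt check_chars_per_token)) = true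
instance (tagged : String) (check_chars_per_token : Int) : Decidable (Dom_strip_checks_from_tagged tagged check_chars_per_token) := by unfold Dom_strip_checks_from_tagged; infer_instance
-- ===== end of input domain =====

-- B re-implements A's accumulator/flush scan as an index-free run scanner; same output, proved equal.

-- ===== PORT A =====
def isTokenSep (c : Char) : Bool :=
  c = ' ' || c = '-' || c = '\'' || c = '.' || c = ',' || c = '!' || c = '?' ||
  c = ':' || c = ';' || c = '\t' || c = '\n' || c = '\r'

-- A's flush(): returns the updated (base, given) or none when the token is too short.
def aFlush (n : Nat) (tok : List Char) (base given : List String) :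
    Option (List String × List String) :=
  if tok.isEmpty then some (base, given)
  else if tok.length ≤ n then none
  else
    some (base ++ [String.mk (PySem.List.slice tok none (some (-(n : Int))))],
          given ++ [String.mk (PySem.List.slice tok (some (-(n : Int))) none)])

def aGo (n : Nat) (cs : List Char) (base given : List String) (tok : List Char) :
    Option (String × List String) :=
  match cs with
  | [] =>
    match aFlush n tok base given with
    | none => none
    | some (b, g) => some (String.join b, g)
  | c :: rest =>
    if isTokenSep c then
      match aFlush n tok base given with
      | none => none
      | some (b, g) => aGo n rest (b ++ [String.singleton c]) g []
    else
      aGo n rest base given (tok ++ [c])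

def strip_checks_from_tagged (tagged : String) (check_chars_per_token : Int) :
    Option (String × List String) :=
  aGo (max 1 check_chars_per_token).toNat tagged.toList [] [] []

-- ===== PORT B =====
def bSeps : List Char := " -'.,!?:;\t\n\r".toList

def bIsSep (c : Char) : Bool := bSeps.contains c

-- B's while loop: scan a whole non-separator run at once and slice it.
-- (tagged[i:j-n] / tagged[j-n:j] with 0 ≤ i < j-n are exactly take/drop on the run.)
def bGo (n : Nat) (cs : List Char) (out given : List String) :
    Option (String × List String) :=
  match cs with
  | [] => some (String.join out, given)
  | c :: rest =>
    if bIsSep c then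
      bGo n rest (out ++ [String.singleton c]) given
    else
      let run := c :: rest.takeWhile (fun d => !bIsSep d)
      let rest' := rest.dropWhile (fun d => !bIsSep d)
      if run.length ≤ n then none
      else bGo n rest' (out ++ [String.mk (run.take (run.length - n))])
                       (given ++ [String.mk (run.drop (run.length - n))])
termination_by cs.length
decreasing_by
  · simp
  · simp only [List.length_cons]
    exact Nat.lt_succ_of_le (List.length_dropWhile_le _ _)

def strip_checks_from_tagged_alt (tagged : String) (check_chars_per_token : Int) :
    Option (String × List String) :=
  bGo (max 1 check_chars_per_token).toNat tagged.toList [] []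

-- ===== PRECONDITION & SPEC =====
def Spec_strip_checks_from_tagged (tagged : String) (check_chars_per_token : Int) (out : Option (String × List String)) : Prop := out = strip_checks_from_tagged_alt tagged check_chars_per_token
instance (tagged : String) (check_chars_per_token : Int) (out : Option (String × List String)) : Decidable (Spec_strip_checks_from_tagged tagged check_chars_per_token out) := by unfold Spec_strip_checks_from_tagged; infer_instance

-- ===== CLAIM (what is proved, stated in full; the proofs are below) =====
def Claim_equal_strip_checks_from_tagged : Prop := ∀ (tagged : String) (check_chars_per_token : Int), Dom_strip_checks_from_tagged tagged check_chars_per_token → Spec_strip_checks_from_tagged tagged check_chars_per_token (strip_checks_from_tagged tagged check_chars_per_token)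

-- ===== LEMMAS AND PROOFS =====
theorem bIsSep_eq (c : Char) : bIsSep c = isTokenSep c := by
  have h : bSeps = [' ', '-', '\'', '.', ',', '!', '?', ':', ';', '\t', '\n', '\r'] := by
    decide
  rw [Bool.eq_iff_iff]
  simp only [bIsSep, h, isTokenSep, List.contains_iff_exists_mem_beq]
  simp
  tauto

theorem takeWhile_append {p : Char → Bool} {ts : List Char} {c : Char} {rest : List Char}
    (h : ∀ x ∈ ts, p x = true) (hc : p c = false) :
    (ts ++ c :: rest).takeWhile p = ts ∧ (ts ++ c :: rest).dropWhile p = c :: rest := by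
  induction ts with
  | nil => simp [hc]
  | cons t ts ih =>
    have ht : p t = true := h t (by simp)
    have ih' := ih fun x hx => h x (by simp [hx])
    simp [ht, ih'.1, ih'.2]

theorem key (n : Nat) (hn : 0 < n) (cs : List Char) :
    ∀ tok base given, (∀ x ∈ tok, isTokenSep x = false) →
      aGo n cs base given tok = bGo n (tok ++ cs) base given := by
  induction cs with
  | nil =>
    intro tok base given h
    cases tok with
    | nil => simp [aGo, aFlush, bGo]
    | cons t ts =>
      have h1 : bIsSep t = false := by rw [bIsSep_eq]; exact h t (by simp)
      have hts : ∀ x ∈ ts, (fun d => !bIsSep d) x = true := by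
        intro x hx; simp [bIsSep_eq, h x (by simp [hx])]
      have htw : List.takeWhile (fun d => !bIsSep d) ts = ts :=
        List.takeWhile_eq_self_iff.mpr hts
      have hdw : List.dropWhile (fun d => !bIsSep d) ts = [] :=
        List.dropWhile_eq_nil_iff.mpr hts
      rw [List.append_nil, bGo, aGo]
      simp only [h1, Bool.false_eq_true, if_false, htw, hdw]
      unfold aFlush
      simp only [List.isEmpty_cons, Bool.false_eq_true, if_false]
      by_cases hlen : (t :: ts).length ≤ n
      · rw [if_pos hlen, if_pos hlen]
      · rw [if_neg hlen, if_neg hlen, PySem.List.slice_to_neg_natCast _ _ hn,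
            PySem.List.slice_from_neg_natCast _ _ hn, bGo]
  | cons c rest ih =>
    intro tok base given h
    by_cases hc : isTokenSep c = true
    · have hcb : bIsSep c = true := by rw [bIsSep_eq]; exact hc
      cases tok with
      | nil =>
        rw [List.nil_append, aGo, bGo]
        simp only [hc, hcb, if_true, aFlush, List.isEmpty_nil, if_true]
        simpa using ih [] (base ++ [String.singleton c]) given (by simp)
      | cons t ts =>
        have h1 : bIsSep t = false := by rw [bIsSep_eq]; exact h t (by simp)
        have hts : ∀ x ∈ ts, (fun d => !bIsSep d) x = true := by
          intro x hx; simp [bIsSep_eq, h x (by simp [hx])]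
        obtain ⟨htw, hdw⟩ :=
          takeWhile_append (p := fun d => !bIsSep d) (c := c) (rest := rest) hts (by simp [hcb])
        rw [List.cons_append, bGo, aGo]
        simp only [h1, Bool.false_eq_true, if_false, htw, hdw, hc, if_true]
        unfold aFlush
        simp only [List.isEmpty_cons, Bool.false_eq_true, if_false]
        by_cases hlen : (t :: ts).length ≤ n
        · rw [if_pos hlen, if_pos hlen]
        · rw [if_neg hlen, if_neg hlen, PySem.List.slice_to_neg_natCast _ _ hn,
              PySem.List.slice_from_neg_natCast _ _ hn, bGo]
          simp only [hcb, if_true]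
          simpa [List.append_assoc] using
            ih [] (base ++ [String.mk ((t :: ts).take ((t :: ts).length - n))] ++
                [String.singleton c])
              (given ++ [String.mk ((t :: ts).drop ((t :: ts).length - n))]) (by simp)
    · rw [aGo]
      simp only [hc, Bool.false_eq_true, if_false]
      have := ih (tok ++ [c]) base given (by
        intro x hx
        rcases List.mem_append.mp hx with hx | hx
        · exact h x hx
        · simp at hx; subst hx; simpa using hc)
      simpa [List.append_assoc] using this

-- ===== VERDICT (by name: the statement is the Claim_ definition above) =====
theorem strip_checks_from_tagged_spec : Claim_equal_strip_checks_from_tagged := by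
  intro tagged check _
  unfold Spec_strip_checks_from_tagged strip_checks_from_tagged strip_checks_from_tagged_alt
  simpa using key (max 1 check).toNat (by omega) tagged.toList [] [] [] (by simp)
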